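-- pv_equiv track=rewrite | github.com/reijosepp/gomokuAI | alphago.py | blast
-- ===== SOURCE A (Python) =====
-- def blast(list_of_letters):
--     new_list = []
--     for s in list_of_letters:
--         for i in range(len(s)):
--             if s[i] == "a":
--                 new_string = s[:i] + " " + s[i + 1:]
--                 add = True
--                 for string in list_of_letters:
--                     if new_string in string:
--                         add = False
--                 if add:
--                     new_list.append(new_string)
--     return set(new_list)
-- ===== SOURCE B (Python) =====
-- def blast(list_of_letters):
--     # Precompute, per string length L, the set of all length-L substrings of every
--     # input string; a candidate test is then a single set lookup instead of a scan.
--     index = {}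
--     for t in list_of_letters:
--         L = len(t)
--         if L not in index:
--             index[L] = {u[j:j + L] for u in list_of_letters
--                         for j in range(len(u) - L + 1)}
--     candidates = [s[:i] + " " + s[i + 1:]
--                   for s in list_of_letters
--                   for i in range(len(s)) if s[i] == "a"]
--     return {c for c in candidates if c not in index[len(c)]}
-- ===== Notes on version B (the rewrite author's own statement) =====
-- stated objective: faster
-- what changed: A rescans every input string with a substring test for each candidate; B precomputes a dict mapping each occurring string length L to the set of all length-L substrings of all inputs, so each candidate is tested by a single set lookup.
import Mathlib
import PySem

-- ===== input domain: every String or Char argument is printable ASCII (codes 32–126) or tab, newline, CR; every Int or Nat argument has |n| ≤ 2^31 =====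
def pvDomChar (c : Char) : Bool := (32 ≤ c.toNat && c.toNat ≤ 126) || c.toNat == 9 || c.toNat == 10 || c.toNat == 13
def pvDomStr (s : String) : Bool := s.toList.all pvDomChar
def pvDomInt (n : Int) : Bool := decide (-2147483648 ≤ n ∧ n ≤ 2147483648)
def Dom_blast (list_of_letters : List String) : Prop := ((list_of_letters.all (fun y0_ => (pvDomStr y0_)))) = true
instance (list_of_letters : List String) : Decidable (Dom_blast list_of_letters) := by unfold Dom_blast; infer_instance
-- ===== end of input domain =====

-- B replaces A's per-candidate scan over all input strings by a precomputed length-indexed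
-- dict of substring sets, so each candidate test is one set lookup (objective: faster).

-- ===== PORT A =====
-- s[:i] + " " + s[i+1:]  (the same expression occurs in both Pythons)
def pvCand (s : List Char) (i : Int) : String :=
  String.ofList (PySem.List.slice s none (some i) ++ [' '] ++ PySem.List.slice s (some (i + 1)) none)

def blast (list_of_letters : List String) : List String :=
  PySem.Set.ofList
    (list_of_letters.foldl (fun new_list s =>
      (PySem.List.pyRange 0 (PySem.Str.len s) 1).foldl (fun new_list i =>
        if PySem.Str.pyGet? s i = some 'a' then
          let new_string := pvCand s.toList i
          let add := list_of_letters.foldl (fun add string =>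
            if PySem.Str.isIn new_string string then false else add) true
          if add then new_list ++ [new_string] else new_list
        else new_list) new_list) [])

-- ===== PORT B =====
-- {u[j:j+L] for u in list_of_letters for j in range(len(u) - L + 1)}
def pvSubsOfLen (ts : List String) (L : Int) : PySem.Set String :=
  PySem.Set.ofList (ts.flatMap (fun u =>
    (PySem.List.pyRange 0 ((u.toList.length : Int) - L + 1) 1).map (fun j =>
      String.ofList (PySem.List.slice u.toList (some j) (some (j + L))))))

-- index = {}; for t in list_of_letters: if len(t) not in index: index[len(t)] = {…}
def pvIndex (ts : List String) : PySem.Dict Int (PySem.Set String) :=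
  ts.foldl (fun index t =>
    if index.contains (PySem.Str.len t) then index
    else index.insert (PySem.Str.len t) (pvSubsOfLen ts (PySem.Str.len t))) PySem.Dict.empty

def blast_alt (list_of_letters : List String) : List String :=
  let index := pvIndex list_of_letters
  let candidates := list_of_letters.flatMap (fun s =>
    ((PySem.List.pyRange 0 (PySem.Str.len s) 1).filter
        (fun i => decide (PySem.Str.pyGet? s i = some 'a'))).map (pvCand s.toList))
  -- index[len(c)]: the key is always present (len c = len of c's source string, which was indexed);
  -- getD with the empty set is the total rendering of that lookup
  PySem.Set.ofList (candidates.filter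
    (fun c => !(index.getD (PySem.Str.len c) PySem.Set.empty).contains c))

-- ===== PRECONDITION & SPEC =====
def Spec_blast (list_of_letters : List String) (out : List String) : Prop := out = blast_alt list_of_letters
instance (list_of_letters : List String) (out : List String) : Decidable (Spec_blast list_of_letters out) := by unfold Spec_blast; infer_instance

-- ===== CLAIM (what is proved, stated in full; the proofs are below) =====
def Claim_equal_blast : Prop := ∀ (list_of_letters : List String), Dom_blast list_of_letters → Spec_blast list_of_letters (blast list_of_letters)

-- ===== LEMMAS AND PROOFS =====

-- replacing one character keeps the length
lemma pv_len_cand (s : List Char) (i : Int) (h0 : 0 ≤ i) (hi : i < (s.length : Int)) :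
    ((pvCand s i).toList.length : Int) = (s.length : Int) := by
  have h1 : PySem.List.slice s none (some i) = s.take i.toNat := PySem.List.slice_to s h0
  have h2 : PySem.List.slice s (some (i+1)) none = s.drop (i+1).toNat := PySem.List.slice_from s (by omega)
  simp [pvCand, h1, h2]
  omega

-- a length-L slice at some admissible start equals c  ↔  c occurs in u (for c of length L)
lemma pv_slice_iff (u : List Char) (c : List Char) (L : Int) (hL : 0 ≤ L)
    (hlen : ((c.length : Int)) = L) :
    (∃ j ∈ PySem.List.pyRange 0 ((u.length : Int) - L + 1) 1,
        PySem.List.slice u (some j) (some (j + L)) = c)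
      ↔ PySem.Chars.isIn c u = true := by
  rw [← PySem.Chars.exists_prefix_drop_iff_isIn]
  constructor
  · rintro ⟨j, hj, hsl⟩
    rw [PySem.List.mem_pyRange_one] at hj
    refine ⟨j.toNat, ?_⟩
    rw [PySem.List.slice_toNat u hj.1 (by omega)] at hsl
    have : (j + L).toNat - j.toNat = L.toNat := by omega
    rw [this] at hsl
    have hcl : c.length = L.toNat := by omega
    rw [List.prefix_iff_eq_take, hcl, hsl]
  · rintro ⟨j0, hpre0⟩
    set j := min j0 u.length with hjdef
    have hpre : c <+: List.drop j u := by
      by_cases h : j0 ≤ u.length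
      · simpa [hjdef, min_eq_left h] using hpre0
      · have h1 : List.drop j0 u = [] := List.drop_eq_nil_of_le (by omega)
        have h2 : List.drop j u = [] := by
          apply List.drop_eq_nil_of_le; omega
        rw [h1] at hpre0; rw [h2]; exact hpre0
    have hjle : j ≤ u.length := min_le_right _ _
    have hjlen : c.length ≤ (List.drop j u).length := hpre.length_le
    simp at hjlen
    refine ⟨(j : Int), ?_, ?_⟩
    · rw [PySem.List.mem_pyRange_one]
      exact ⟨by positivity, by omega⟩
    · rw [PySem.List.slice_toNat u (by positivity) (by positivity)]
      have h1 : ((j:Int) + L).toNat - (j:Int).toNat = L.toNat := by omega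
      rw [h1, Int.toNat_natCast]
      have hcl : L.toNat = c.length := by omega
      rw [hcl, ← List.prefix_iff_eq_take.mp hpre]

-- membership in the length-L substring set = "occurs in some input", for strings of length L
lemma pv_contains_subs (ts : List String) (c : String) (L : Int) (hL : 0 ≤ L)
    (hlen : ((c.toList.length : Int)) = L) :
    (pvSubsOfLen ts L).contains c = ts.any (fun t => PySem.Str.isIn c t) := by
  apply Bool.eq_iff_iff.mpr
  rw [PySem.Set.contains_eq_decide, decide_eq_true_eq]
  rw [pvSubsOfLen, PySem.Set.mem_ofList, List.mem_flatMap, List.any_eq_true]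
  constructor
  · rintro ⟨u, hu, hc⟩
    rw [List.mem_map] at hc
    obtain ⟨j, hj, hcj⟩ := hc
    refine ⟨u, hu, ?_⟩
    rw [PySem.Str.isIn_eq]
    rw [← (pv_slice_iff u.toList c.toList L hL hlen)]
    refine ⟨j, hj, ?_⟩
    rw [← hcj, String.toList_ofList]
  · rintro ⟨u, hu, hin⟩
    rw [PySem.Str.isIn_eq] at hin
    rw [← (pv_slice_iff u.toList c.toList L hL hlen)] at hin
    obtain ⟨j, hj, hsl⟩ := hin
    refine ⟨u, hu, ?_⟩
    rw [List.mem_map]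
    exact ⟨j, hj, by rw [hsl, String.ofList_toList]⟩

-- every value the index stores is the substring set of its key, and every input's length is a key
lemma pv_index_aux (ts rest : List String) (d : PySem.Dict Int (PySem.Set String))
    (hinv : ∀ L v, d.get? L = some v → v = pvSubsOfLen ts L) :
    (∀ L v, (rest.foldl (fun index t =>
        if index.contains (PySem.Str.len t) then index
        else index.insert (PySem.Str.len t) (pvSubsOfLen ts (PySem.Str.len t))) d).get? L = some v
      → v = pvSubsOfLen ts L) ∧
    (∀ L, (d.get? L).isSome → ((rest.foldl (fun index t =>
        if index.contains (PySem.Str.len t) then index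
        else index.insert (PySem.Str.len t) (pvSubsOfLen ts (PySem.Str.len t))) d).get? L).isSome) ∧
    (∀ t ∈ rest, ((rest.foldl (fun index t =>
        if index.contains (PySem.Str.len t) then index
        else index.insert (PySem.Str.len t) (pvSubsOfLen ts (PySem.Str.len t))) d).get? (PySem.Str.len t)).isSome) := by
  induction rest generalizing d with
  | nil => exact ⟨hinv, fun L h => h, fun t ht => absurd ht (List.not_mem_nil)⟩
  | cons t rest ih =>
    simp only [List.foldl_cons]
    set d' := if d.contains (PySem.Str.len t) then d
      else d.insert (PySem.Str.len t) (pvSubsOfLen ts (PySem.Str.len t)) with hd'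
    have hinv' : ∀ L v, d'.get? L = some v → v = pvSubsOfLen ts L := by
      intro L v hv
      rw [hd'] at hv
      split at hv
      · exact hinv L v hv
      · rw [PySem.Dict.get?_insert] at hv
        split at hv
        · next h => subst h; exact (Option.some_inj.mp hv).symm
        · exact hinv L v hv
    have hpres : ∀ L, (d.get? L).isSome → (d'.get? L).isSome := by
      intro L h
      rw [hd']
      split
      · exact h
      · rw [PySem.Dict.get?_insert]
        split
        · simp
        · exact h
    have hself : (d'.get? (PySem.Str.len t)).isSome := by
      rw [hd']
      split
      · next h => rw [PySem.Dict.contains_eq_isSome_get?] at h; exact h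
      · rw [PySem.Dict.get?_insert_self]; simp
    obtain ⟨i1, i2, i3⟩ := ih d' hinv'
    refine ⟨i1, fun L h => i2 L (hpres L h), ?_⟩
    intro u hu
    rcases List.mem_cons.mp hu with h | h
    · rw [h]; exact i2 _ hself
    · exact i3 u h

lemma pv_index_getD (ts : List String) (s : String) (hs : s ∈ ts) :
    (pvIndex ts).getD (PySem.Str.len s) PySem.Set.empty
      = pvSubsOfLen ts (PySem.Str.len s) := by
  obtain ⟨i1, _, i3⟩ := pv_index_aux ts ts PySem.Dict.empty
    (by intro L v hv; rw [PySem.Dict.get?_empty] at hv; cases hv)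
  have hsome := i3 s hs
  rw [pvIndex]
  obtain ⟨v, hv⟩ := Option.isSome_iff_exists.mp hsome
  rw [PySem.Dict.getD_of_get?_eq_some _ PySem.Set.empty hv]
  exact i1 _ _ hv

-- the per-string candidate list both programs produce
def pvGA (ts : List String) (s : String) : List String :=
  ((PySem.List.pyRange 0 (PySem.Str.len s) 1).filter
      (fun i => decide (PySem.Str.pyGet? s i = some 'a')
        && !(ts.any (fun t => PySem.Str.isIn (pvCand s.toList i) t)))).map (pvCand s.toList)

lemma pv_A_eq (ts : List String) :
    blast ts = PySem.Set.ofList (ts.flatMap (pvGA ts)) := by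
  unfold blast
  congr 1
  have hstep : ∀ s ∈ ts, ∀ acc : List String,
      (PySem.List.pyRange 0 (PySem.Str.len s) 1).foldl (fun new_list i =>
        if PySem.Str.pyGet? s i = some 'a' then
          let new_string := pvCand s.toList i
          let add := ts.foldl (fun add string =>
            if PySem.Str.isIn new_string string then false else add) true
          if add then new_list ++ [new_string] else new_list
        else new_list) acc = acc ++ pvGA ts s := by
    intro s _ acc
    have hinner : ∀ i ∈ PySem.List.pyRange 0 (PySem.Str.len s) 1, ∀ acc2 : List String,
        (if PySem.Str.pyGet? s i = some 'a' then
          let new_string := pvCand s.toList i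
          let add := ts.foldl (fun add string =>
            if PySem.Str.isIn new_string string then false else add) true
          if add then acc2 ++ [new_string] else acc2
        else acc2)
        = if (decide (PySem.Str.pyGet? s i = some 'a')
            && !(ts.any (fun t => PySem.Str.isIn (pvCand s.toList i) t))) = true
          then acc2 ++ [pvCand s.toList i] else acc2 := by
      intro i _ acc2
      have hb : PySem.Str.pyGet? s i = PySem.List.pyGet? s.toList i := by simp [pysem]
      by_cases hc : PySem.List.pyGet? s.toList i = some 'a'
      · simp only [if_pos (hb ▸ hc), PySem.List.foldl_if_false_eq]
        simp [hc]
      · simp [hc]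
    rw [PySem.List.foldl_congr_mem' _ _ _ acc hinner, PySem.List.foldl_append_if]
    rfl
  rw [PySem.List.foldl_congr_mem' ts _ _ [] hstep, PySem.List.foldl_append_eq_flatMap,
    List.nil_append]

lemma pv_B_eq (ts : List String) :
    blast_alt ts = PySem.Set.ofList (ts.flatMap (pvGA ts)) := by
  unfold blast_alt
  simp only []
  congr 1
  rw [List.filter_flatMap]
  apply List.flatMap_congr
  intro s hs
  rw [List.filter_map, List.filter_filter]
  unfold pvGA
  apply congrArg (List.map (pvCand s.toList))
  apply List.filter_congr
  intro i hi
  rw [PySem.List.mem_pyRange_one] at hi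
  have hlen0 : PySem.Str.len s = (s.toList.length : Int) := by simp [pysem]
  have hlc : ((pvCand s.toList i).toList.length : Int) = (s.toList.length : Int) :=
    pv_len_cand s.toList i hi.1 (by rw [← hlen0]; exact hi.2)
  have hls : PySem.Str.len (pvCand s.toList i) = PySem.Str.len s := by
    have : PySem.Str.len (pvCand s.toList i)
        = ((pvCand s.toList i).toList.length : Int) := by simp [pysem]
    rw [this, hlc, hlen0]
  have hq : ((pvIndex ts).getD (PySem.Str.len (pvCand s.toList i)) PySem.Set.empty).contains
        (pvCand s.toList i)
      = ts.any (fun t => PySem.Str.isIn (pvCand s.toList i) t) := by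
    rw [hls, pv_index_getD ts s hs]
    exact pv_contains_subs ts (pvCand s.toList i) (PySem.Str.len s)
      (by rw [hlen0]; positivity) (by rw [hlc, hlen0])
  simp only [Function.comp]
  rw [hq]
  cases hd : decide (PySem.Str.pyGet? s i = some 'a') <;>
    cases ha : ts.any (fun t => PySem.Str.isIn (pvCand s.toList i) t) <;> simp

-- ===== VERDICT (by name: the statement is the Claim_ definition above) =====
theorem blast_spec : Claim_equal_blast := by
  intro ts _
  unfold Spec_blast
  rw [pv_A_eq, pv_B_eq]
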